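-- pv_equiv track=rewrite | github.com/5bennaughton/AssignmentOneAI | Assignment_One_AI.py | count_soft_penalty
-- ===== SOURCE A (Python) =====
-- from typing import List, Tuple
--
-- def count_soft_penalty(schedule: List[int], enrollment: List[List[int]]) -> int:
--     penalty = 0
--
--     for studentRow in enrollment:
--         slots = []
--
--         for examIndex, takesExam in enumerate(studentRow):
--             if takesExam == 1:
--                 slots.append(schedule[examIndex])
--
--         slots.sort()
--
--         for i in range(len(slots) - 1):
--             if slots[i + 1] == slots[i] + 1:
--                 penalty += 1
--
--     return penalty
-- ===== SOURCE B (Python) =====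
-- def count_soft_penalty(schedule, enrollment):
--     penalty = 0
--     for row in enrollment:
--         s = {schedule[i] for i, t in enumerate(row) if t == 1}
--         penalty += sum(1 for v in s if v + 1 in s)
--     return penalty
-- ===== Notes on version B (the rewrite author's own statement) =====
-- stated objective: simpler
-- what changed: B collects each student's distinct taken slots into a set and counts values v with v+1 also present, eliminating A's sort and adjacent-pair scan (duplicate slots collapse harmlessly: each v/v+1 boundary yields exactly one sorted adjacent pair).
-- outside the precondition, e.g. on count_soft_penalty([5], [[1, 1]]): A raises IndexError, B raises IndexError
import Mathlib
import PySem

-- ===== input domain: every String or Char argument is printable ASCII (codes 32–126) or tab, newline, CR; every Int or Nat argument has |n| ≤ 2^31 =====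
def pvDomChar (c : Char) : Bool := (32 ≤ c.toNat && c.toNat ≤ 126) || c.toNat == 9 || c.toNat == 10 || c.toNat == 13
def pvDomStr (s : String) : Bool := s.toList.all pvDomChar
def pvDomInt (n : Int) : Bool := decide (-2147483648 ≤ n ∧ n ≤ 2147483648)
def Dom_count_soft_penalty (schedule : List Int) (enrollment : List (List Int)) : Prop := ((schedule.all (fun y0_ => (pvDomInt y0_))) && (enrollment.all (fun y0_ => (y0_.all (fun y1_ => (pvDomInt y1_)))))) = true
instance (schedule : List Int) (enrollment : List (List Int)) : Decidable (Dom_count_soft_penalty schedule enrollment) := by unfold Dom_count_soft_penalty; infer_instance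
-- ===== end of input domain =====

-- B replaces A's per-row sort and adjacent-pair scan by a set of the distinct taken
-- slots and a count of values v with v+1 also present (simpler; no sorting).

-- ===== PORT A =====
def count_soft_penalty (schedule : List Int) (enrollment : List (List Int)) : Int :=
  enrollment.foldl (fun penalty studentRow =>
    let slots :=
      (PySem.List.enumerate studentRow 0).foldl
        (fun acc p => if p.2 = 1 then acc ++ [PySem.List.pyGetD schedule p.1 0] else acc) []
    let slots := PySem.List.sorted slots (fun x => x) false
    (PySem.List.pyRange 0 ((slots.length : Int) - 1) 1).foldl
      (fun pen i =>
        if PySem.List.pyGetD slots (i + 1) 0 = PySem.List.pyGetD slots i 0 + 1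
        then pen + 1 else pen)
      penalty) 0

-- ===== PORT B =====
def count_soft_penalty_alt (schedule : List Int) (enrollment : List (List Int)) : Int :=
  enrollment.foldl (fun penalty row =>
    let s : PySem.Set Int := PySem.Set.ofList
      ((PySem.List.enumerate row 0).filterMap
        (fun p => if p.2 = 1 then some (PySem.List.pyGetD schedule p.1 0) else none))
    penalty + (s.countP (fun v => PySem.Set.contains s (v + 1)) : Int)) 0

-- ===== PRECONDITION & SPEC =====
-- Pre_: Python A indexes schedule[examIndex] and raises IndexError when a row has a
-- 1-entry at an index past the end of schedule; Python B raises there too, so those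
-- inputs are excluded.
def Pre_count_soft_penalty (schedule : List Int) (enrollment : List (List Int)) : Prop :=
  ∀ row ∈ enrollment, ∀ p ∈ row.zipIdx, p.1 = 1 → p.2 < schedule.length
instance (schedule : List Int) (enrollment : List (List Int)) : Decidable (Pre_count_soft_penalty schedule enrollment) := by unfold Pre_count_soft_penalty; infer_instance

def pvWitness_count_soft_penalty : List Int × List (List Int) :=
  ([1, 2, 2, 5], [[1, 1, 0, 1], [0, 1, 1, 0], [1, 0, 0, 0], []])

def Spec_count_soft_penalty (schedule : List Int) (enrollment : List (List Int)) (out : Int) : Prop := out = count_soft_penalty_alt schedule enrollment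
instance (schedule : List Int) (enrollment : List (List Int)) (out : Int) : Decidable (Spec_count_soft_penalty schedule enrollment out) := by unfold Spec_count_soft_penalty; infer_instance

-- ===== CLAIM (what is proved, stated in full; the proofs are below) =====
def Claim_equal_count_soft_penalty : Prop := ∀ (schedule : List Int) (enrollment : List (List Int)), Dom_count_soft_penalty schedule enrollment → Pre_count_soft_penalty schedule enrollment → Spec_count_soft_penalty schedule enrollment (count_soft_penalty schedule enrollment)

-- ===== LEMMAS AND PROOFS =====

-- Index-based adjacent count equals the count over zipped consecutive pairs.
theorem rangeCount_eq_zip (L : List Int) :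
    (List.range (L.length - 1)).countP
        (fun k => decide (L.getD (k + 1) 0 = L.getD k 0 + 1))
    = (L.zip L.tail).countP (fun q => decide (q.2 = q.1 + 1)) := by
  induction L with
  | nil => simp
  | cons a t ih =>
    cases t with
    | nil => simp
    | cons b t' =>
      have hlen : (a :: b :: t').length - 1 = (b :: t').length - 1 + 1 := by
        simp
      rw [hlen, List.range_succ_eq_map]
      simp only [List.countP_cons, List.countP_map]
      have hfun : ((fun k => decide ((a :: b :: t').getD (k + 1) 0 = (a :: b :: t').getD k 0 + 1)) ∘ Nat.succ)
          = (fun k => decide ((b :: t').getD (k + 1) 0 = (b :: t').getD k 0 + 1)) := by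
        funext k
        simp [Function.comp]
      rw [hfun, ih]
      simp [List.zip, List.countP_cons]

-- A's index loop over the sorted slots counts the adjacent consecutive pairs.
theorem adjLoop_eq (L : List Int) (pen : Int) :
    (PySem.List.pyRange 0 ((L.length : Int) - 1) 1).foldl
      (fun pen i =>
        if PySem.List.pyGetD L (i + 1) 0 = PySem.List.pyGetD L i 0 + 1
        then pen + 1 else pen) pen
    = pen + ((L.zip L.tail).countP (fun q => decide (q.2 = q.1 + 1)) : Int) := by
  rw [PySem.List.foldl_ite_add_one
        (fun i => PySem.List.pyGetD L (i + 1) 0 = PySem.List.pyGetD L i 0 + 1)]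
  rw [PySem.List.pyRange_one, List.countP_map]
  have h1 : ((L.length : Int) - 1 - 0).toNat = L.length - 1 := by omega
  rw [h1]
  have hcc : List.countP
      ((fun x => decide (PySem.List.pyGetD L (x + 1) 0 = PySem.List.pyGetD L x 0 + 1)) ∘
        fun k : Nat => (0 : Int) + (k : Int)) (List.range (L.length - 1))
      = List.countP (fun k => decide (L.getD (k + 1) 0 = L.getD k 0 + 1))
        (List.range (L.length - 1)) := by
    apply List.countP_congr
    intro k _
    have h2 : (0 : Int) + (k : Int) = ((k : Nat) : Int) := by omega
    have h3 : (k : Int) + 1 = (((k + 1 : Nat)) : Int) := by push_cast; ring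
    simp only [Function.comp, h2, h3, PySem.List.pyGetD_natCast]
  rw [hcc, rangeCount_eq_zip]

-- Core identity: on a ≤-sorted list, the number of adjacent consecutive pairs equals
-- the number of distinct values v with v+1 present.
theorem adj_sorted_eq_dedup (L : List Int) (h : L.Pairwise (· ≤ ·)) :
    (L.zip L.tail).countP (fun q => decide (q.2 = q.1 + 1))
    = L.dedup.countP (fun v => decide ((v + 1) ∈ L)) := by
  induction L with
  | nil => simp
  | cons a t ih =>
    cases t with
    | nil => simp
    | cons b t' =>
      rw [List.pairwise_cons] at h
      obtain ⟨ha, h'⟩ := h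
      have hab : a ≤ b := ha b (by simp)
      have hbmin : ∀ v ∈ b :: t', b ≤ v := by
        intro v hv
        rcases List.mem_cons.mp hv with h1 | h1
        · omega
        · exact (List.pairwise_cons.mp h').1 v h1
      by_cases hmem : a ∈ b :: t'
      · have hba : b ≤ a := hbmin a hmem
        have heq : b = a := le_antisymm hba hab
        subst heq
        rw [List.dedup_cons_of_mem hmem]
        have hpred : (fun v => decide ((v + 1) ∈ b :: b :: t'))
            = (fun v => decide ((v + 1) ∈ b :: t')) := by
          funext v
          simp [List.mem_cons]
        rw [hpred, ← ih h']
        simp [List.zip]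
      · rw [List.dedup_cons_of_notMem hmem]
        have halt : a < b := lt_of_le_of_ne hab (fun hx => hmem (hx ▸ List.mem_cons_self))
        have hc1 : ((a + 1) ∈ a :: b :: t') ↔ b = a + 1 := by
          constructor
          · intro hx
            rcases List.mem_cons.mp hx with h1 | h1
            · omega
            · have := hbmin _ h1; omega
          · intro hx; simp [List.mem_cons]; omega
        have hc2 : ∀ v ∈ (b :: t').dedup,
            (decide ((v + 1) ∈ a :: b :: t')) = (decide ((v + 1) ∈ b :: t')) := by
          intro v hv
          have hvb : b ≤ v := hbmin v (List.mem_dedup.mp hv)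
          simp [List.mem_cons]
          omega
        rw [List.countP_cons,
           List.countP_congr (fun v hv => iff_of_eq (congrArg (· = true) (hc2 v hv))), ← ih h']
        simp only [List.zip, List.tail_cons]
        have : (decide ((a + 1) ∈ a :: b :: t') = true) ↔ (decide (b = a + 1) = true) := by
          simp [hc1]
        rcases Bool.eq_false_or_eq_true (decide ((a + 1) ∈ a :: b :: t')) with hb | hb <;>
          rcases Bool.eq_false_or_eq_true (decide (b = a + 1)) with hb2 | hb2 <;>
            simp_all [List.zipWith]

-- A's append-in-loop slot building is map over the filtered enumeration.
theorem build_slots (f : Int × Int → Int) (l : List (Int × Int)) (acc : List Int) :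
    l.foldl (fun acc p => if p.2 = 1 then acc ++ [f p] else acc) acc
    = acc ++ (l.filter (fun p => decide (p.2 = 1))).map f := by
  induction l generalizing acc with
  | nil => simp
  | cons q l ih =>
    by_cases hq : q.2 = 1 <;> simp [hq, ih]

-- B's filterMap is the same map over the same filtered enumeration.
theorem filterMap_slots (f : Int × Int → Int) (l : List (Int × Int)) :
    l.filterMap (fun p => if p.2 = 1 then some (f p) else none)
    = (l.filter (fun p => decide (p.2 = 1))).map f := by
  induction l with
  | nil => simp
  | cons q l ih =>
    by_cases hq : q.2 = 1 <;> simp [hq, ih]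

-- Bridge from the sorted-dedup count to B's set-based count.
theorem set_count_eq (xs : List Int) :
    ((PySem.List.sorted xs (fun x => x) false).dedup.countP
        (fun v => decide ((v + 1) ∈ PySem.List.sorted xs (fun x => x) false)) : Int)
    = ((PySem.Set.ofList xs).countP
        (fun v => PySem.Set.contains (PySem.Set.ofList xs) (v + 1)) : Int) := by
  have hpred : ∀ v : Int,
      (decide ((v + 1) ∈ PySem.List.sorted xs (fun x => x) false))
      = PySem.Set.contains (PySem.Set.ofList xs) (v + 1) := by
    intro v
    rcases Bool.eq_false_or_eq_true (PySem.Set.contains (PySem.Set.ofList xs) (v + 1)) with hb | hb <;>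
      simp_all [PySem.Set.mem_ofList, PySem.List.mem_sorted]
  have hperm : (PySem.List.sorted xs (fun x => x) false).dedup.Perm (PySem.Set.ofList xs) := by
    rw [List.perm_ext_iff_of_nodup (List.nodup_dedup _) (PySem.Set.nodup_ofList xs)]
    intro v
    rw [List.mem_dedup, PySem.List.mem_sorted, PySem.Set.mem_ofList]
  have : (PySem.List.sorted xs (fun x => x) false).dedup.countP
      (fun v => decide ((v + 1) ∈ PySem.List.sorted xs (fun x => x) false))
      = (PySem.Set.ofList xs).countP
        (fun v => PySem.Set.contains (PySem.Set.ofList xs) (v + 1)) := by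
    rw [List.countP_congr (fun v _ => iff_of_eq (congrArg (· = true) (hpred v)))]
    exact hperm.countP_eq _
  rw [this]

-- Per-row: A's loop starting from pen equals pen plus B's per-row count.
theorem row_eq (schedule row : List Int) (pen : Int) :
    (fun penalty studentRow =>
      let slots :=
        (PySem.List.enumerate studentRow 0).foldl
          (fun acc p => if p.2 = 1 then acc ++ [PySem.List.pyGetD schedule p.1 0] else acc) []
      let slots := PySem.List.sorted slots (fun x => x) false
      (PySem.List.pyRange 0 ((slots.length : Int) - 1) 1).foldl
        (fun pen i =>
          if PySem.List.pyGetD slots (i + 1) 0 = PySem.List.pyGetD slots i 0 + 1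
          then pen + 1 else pen)
        penalty) pen row
    = (fun penalty r =>
      let s : PySem.Set Int := PySem.Set.ofList
        ((PySem.List.enumerate r 0).filterMap
          (fun p => if p.2 = 1 then some (PySem.List.pyGetD schedule p.1 0) else none))
      penalty + (s.countP (fun v => PySem.Set.contains s (v + 1)) : Int)) pen row := by
  simp only
  rw [build_slots, filterMap_slots, List.nil_append]
  set xs := ((PySem.List.enumerate row 0).filter (fun p => decide (p.2 = 1))).map
      (fun p => PySem.List.pyGetD schedule p.1 0) with hxs
  rw [adjLoop_eq, adj_sorted_eq_dedup _ (PySem.List.sorted_pairwise xs (fun x => x)), set_count_eq]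

-- ===== VERDICT (by name: the statement is the Claim_ definition above) =====
theorem count_soft_penalty_spec : Claim_equal_count_soft_penalty := by
  intro schedule enrollment _ _
  unfold Spec_count_soft_penalty count_soft_penalty count_soft_penalty_alt
  congr 1
  funext pen row
  exact row_eq schedule row pen
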